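-- pv_equiv track=rewrite | github.com/wolfgangihloff/tahecho | src/tahecho/agents/langgraph_workflow.py | _create_user_friendly_error_message
-- ===== SOURCE A (Python) =====
-- def _create_user_friendly_error_message(
--     agent_errors: list, user_input: str
-- ) -> str:
--     """Create a user-friendly error message based on the type of error."""
--     if not agent_errors:
--         return "I'm sorry, but I encountered an unexpected issue. Please try again."
--
--     # Analyze the errors to determine what went wrong
--     error_types = []
--     for agent, error in agent_errors:
--         error_str = str(error).lower()
--
--         # Check for specific error types
--         if "api key" in error_str or "invalid api key" in error_str:
--             error_types.append("openai_api")
--         elif "401" in error_str or "unauthorized" in error_str: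
--             if "jira" in error_str or agent == "mcp_agent":
--                 error_types.append("jira_auth")
--             else:
--                 error_types.append("api_auth")
--         elif "connection" in error_str or "timeout" in error_str:
--             error_types.append("connection")
--         # Graph DB support removed
--         else:
--             error_types.append("general")
--
--     # Create appropriate user message
--     if "openai_api" in error_types:
--         return "I'm having trouble connecting to my language processing service. This might be a temporary issue. Please try again in a moment."
--     elif "jira_auth" in error_types:
--         return "I'm unable to access your Jira information right now. Please check your Jira credentials and try again."
--     # Graph DB error handling removed
--     elif "connection" in error_types:
--         return "I'm experiencing connection issues with one of my services. Please try again in a moment."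
--     elif "api_auth" in error_types:
--         return "I'm having trouble authenticating with one of my services. Please check your configuration and try again."
--     else:
--         return "I encountered an issue while processing your request. Please try rephrasing your question or try again later."
-- ===== SOURCE B (Python) =====
-- def _create_user_friendly_error_message(
--     agent_errors: list, user_input: str
-- ) -> str:
--     """Create a user-friendly error message based on the type of error."""
--     if not agent_errors:
--         return "I'm sorry, but I encountered an unexpected issue. Please try again."
--
--     # Lowercase once, then check each message category, highest priority first,
--     # with an existence scan over the errors; the predicates mirror the elif
--     # precedence (each negates the conditions of the higher-priority branches).
--     lowered = [(agent, str(error).lower()) for agent, error in agent_errors]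
--
--     def keyish(s):
--         return "api key" in s or "invalid api key" in s
--
--     def unauth(s):
--         return "401" in s or "unauthorized" in s
--
--     if any(keyish(s) for _, s in lowered):
--         return "I'm having trouble connecting to my language processing service. This might be a temporary issue. Please try again in a moment."
--     if any(not keyish(s) and unauth(s) and ("jira" in s or a == "mcp_agent")
--            for a, s in lowered):
--         return "I'm unable to access your Jira information right now. Please check your Jira credentials and try again."
--     if any(not keyish(s) and not unauth(s) and ("connection" in s or "timeout" in s)
--            for _, s in lowered):
--         return "I'm experiencing connection issues with one of my services. Please try again in a moment."
--     if any(not keyish(s) and unauth(s) and not ("jira" in s or a == "mcp_agent")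
--            for a, s in lowered):
--         return "I'm having trouble authenticating with one of my services. Please check your configuration and try again."
--     return "I encountered an issue while processing your request. Please try rephrasing your question or try again later."
-- ===== Notes on version B (the rewrite author's own statement) =====
-- stated objective: alternative
-- what changed: Instead of building a per-error category list and then scanning it four times, B lowercases once and runs one existence scan per message category in priority order, using disjoint predicates that encode the elif precedence.
import Mathlib
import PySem

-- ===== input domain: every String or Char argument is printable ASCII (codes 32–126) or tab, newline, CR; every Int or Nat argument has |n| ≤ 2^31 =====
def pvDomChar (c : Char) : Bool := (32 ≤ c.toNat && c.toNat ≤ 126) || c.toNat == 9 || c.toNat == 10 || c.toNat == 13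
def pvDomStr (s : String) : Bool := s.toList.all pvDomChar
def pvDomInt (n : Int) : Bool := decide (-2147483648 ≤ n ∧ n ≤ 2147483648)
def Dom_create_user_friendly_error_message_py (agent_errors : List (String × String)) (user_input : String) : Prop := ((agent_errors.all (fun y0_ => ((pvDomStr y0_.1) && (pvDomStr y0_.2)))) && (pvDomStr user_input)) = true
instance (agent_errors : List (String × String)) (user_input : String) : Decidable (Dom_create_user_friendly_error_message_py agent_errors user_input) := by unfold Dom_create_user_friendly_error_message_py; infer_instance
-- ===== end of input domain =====

-- B replaces A's collect-a-category-per-error-then-scan-four-times shape by one existence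
-- scan per message category in priority order, over a once-lowercased list: no intermediate
-- category list is built (objective: alternative decomposition, same cost).

-- The five fixed user messages (shared string constants of both ports)
def pvMsgEmpty : String := "I'm sorry, but I encountered an unexpected issue. Please try again."
def pvMsgOpenai : String := "I'm having trouble connecting to my language processing service. This might be a temporary issue. Please try again in a moment."
def pvMsgJira : String := "I'm unable to access your Jira information right now. Please check your Jira credentials and try again."
def pvMsgConn : String := "I'm experiencing connection issues with one of my services. Please try again in a moment."
def pvMsgAuth : String := "I'm having trouble authenticating with one of my services. Please check your configuration and try again."
def pvMsgGeneral : String := "I encountered an issue while processing your request. Please try rephrasing your question or try again later."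

-- ===== PORT A =====
def create_user_friendly_error_message_py (agent_errors : List (String × String)) (user_input : String) : String :=
  if agent_errors = [] then pvMsgEmpty
  else
    let error_types : List String := agent_errors.foldl (fun acc p =>
      let error_str := PySem.Str.lower p.2
      if PySem.Str.isIn "api key" error_str || PySem.Str.isIn "invalid api key" error_str then
        acc ++ ["openai_api"]
      else if PySem.Str.isIn "401" error_str || PySem.Str.isIn "unauthorized" error_str then
        (if PySem.Str.isIn "jira" error_str || p.1 == "mcp_agent" then acc ++ ["jira_auth"]
         else acc ++ ["api_auth"])
      else if PySem.Str.isIn "connection" error_str || PySem.Str.isIn "timeout" error_str then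
        acc ++ ["connection"]
      else acc ++ ["general"]) []
    if error_types.contains "openai_api" then pvMsgOpenai
    else if error_types.contains "jira_auth" then pvMsgJira
    else if error_types.contains "connection" then pvMsgConn
    else if error_types.contains "api_auth" then pvMsgAuth
    else pvMsgGeneral

-- ===== PORT B =====
-- Source B's helper predicates
def pvKeyish (s : String) : Bool := PySem.Str.isIn "api key" s || PySem.Str.isIn "invalid api key" s
def pvUnauth (s : String) : Bool := PySem.Str.isIn "401" s || PySem.Str.isIn "unauthorized" s

def create_user_friendly_error_message_py_alt (agent_errors : List (String × String)) (user_input : String) : String :=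
  if agent_errors = [] then pvMsgEmpty
  else
    let lowered : List (String × String) := agent_errors.map (fun p => (p.1, PySem.Str.lower p.2))
    if lowered.any (fun q => pvKeyish q.2) then pvMsgOpenai
    else if lowered.any (fun q => !pvKeyish q.2 && pvUnauth q.2 &&
        (PySem.Str.isIn "jira" q.2 || q.1 == "mcp_agent")) then pvMsgJira
    else if lowered.any (fun q => !pvKeyish q.2 && !pvUnauth q.2 &&
        (PySem.Str.isIn "connection" q.2 || PySem.Str.isIn "timeout" q.2)) then pvMsgConn
    else if lowered.any (fun q => !pvKeyish q.2 && pvUnauth q.2 &&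
        !(PySem.Str.isIn "jira" q.2 || q.1 == "mcp_agent")) then pvMsgAuth
    else pvMsgGeneral

-- ===== PRECONDITION & SPEC =====
def Spec_create_user_friendly_error_message_py (agent_errors : List (String × String)) (user_input : String) (out : String) : Prop := out = create_user_friendly_error_message_py_alt agent_errors user_input
instance (agent_errors : List (String × String)) (user_input : String) (out : String) : Decidable (Spec_create_user_friendly_error_message_py agent_errors user_input out) := by unfold Spec_create_user_friendly_error_message_py; infer_instance

-- ===== CLAIM (what is proved, stated in full; the proofs are below) =====
def Claim_equal_create_user_friendly_error_message_py : Prop := ∀ (agent_errors : List (String × String)) (user_input : String), Dom_create_user_friendly_error_message_py agent_errors user_input → Spec_create_user_friendly_error_message_py agent_errors user_input (create_user_friendly_error_message_py agent_errors user_input)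

-- ===== LEMMAS AND PROOFS =====

-- Category string of one pair, as A computes it
def pvCatOf (p : String × String) : String :=
  let error_str := PySem.Str.lower p.2
  if PySem.Str.isIn "api key" error_str || PySem.Str.isIn "invalid api key" error_str then "openai_api"
  else if PySem.Str.isIn "401" error_str || PySem.Str.isIn "unauthorized" error_str then
    (if PySem.Str.isIn "jira" error_str || p.1 == "mcp_agent" then "jira_auth" else "api_auth")
  else if PySem.Str.isIn "connection" error_str || PySem.Str.isIn "timeout" error_str then "connection"
  else "general"

lemma pvMapContainsAny (l : List (String × String)) (s : String) (pred : String × String → Bool)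
    (h : ∀ p, (s == pvCatOf p) = pred p) :
    (l.map pvCatOf).contains s = l.any pred := by
  induction l with
  | nil => simp
  | cons p l ih => simp only [List.map_cons, List.contains_cons, List.any_cons, ih, h p]

lemma pvCatOpenai (p : String × String) :
    ("openai_api" == pvCatOf p) = pvKeyish (PySem.Str.lower p.2) := by
  unfold pvCatOf pvKeyish; dsimp only; split_ifs <;> simp_all

lemma pvCatJira (p : String × String) :
    ("jira_auth" == pvCatOf p) =
      (!pvKeyish (PySem.Str.lower p.2) && pvUnauth (PySem.Str.lower p.2) &&
        (PySem.Str.isIn "jira" (PySem.Str.lower p.2) || p.1 == "mcp_agent")) := by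
  unfold pvCatOf pvKeyish pvUnauth; dsimp only; split_ifs <;> simp_all <;> (intros; simp_all)

lemma pvCatConn (p : String × String) :
    ("connection" == pvCatOf p) =
      (!pvKeyish (PySem.Str.lower p.2) && !pvUnauth (PySem.Str.lower p.2) &&
        (PySem.Str.isIn "connection" (PySem.Str.lower p.2) || PySem.Str.isIn "timeout" (PySem.Str.lower p.2))) := by
  unfold pvCatOf pvKeyish pvUnauth; dsimp only; split_ifs <;> simp_all <;> (intros; simp_all)

lemma pvCatAuth (p : String × String) :
    ("api_auth" == pvCatOf p) =
      (!pvKeyish (PySem.Str.lower p.2) && pvUnauth (PySem.Str.lower p.2) &&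
        !(PySem.Str.isIn "jira" (PySem.Str.lower p.2) || p.1 == "mcp_agent")) := by
  unfold pvCatOf pvKeyish pvUnauth; dsimp only; split_ifs <;> simp_all <;> (intros; simp_all)

-- ===== VERDICT (by name: the statement is the Claim_ definition above) =====
theorem create_user_friendly_error_message_py_spec : Claim_equal_create_user_friendly_error_message_py := by
  intro agent_errors user_input _
  unfold Spec_create_user_friendly_error_message_py
  unfold create_user_friendly_error_message_py create_user_friendly_error_message_py_alt
  by_cases hne : agent_errors = []
  · simp [hne]
  · simp only [hne, if_false]
    have hfA : (fun (acc : List String) (p : String × String) =>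
      let error_str := PySem.Str.lower p.2
      if PySem.Str.isIn "api key" error_str || PySem.Str.isIn "invalid api key" error_str then
        acc ++ ["openai_api"]
      else if PySem.Str.isIn "401" error_str || PySem.Str.isIn "unauthorized" error_str then
        (if PySem.Str.isIn "jira" error_str || p.1 == "mcp_agent" then acc ++ ["jira_auth"]
         else acc ++ ["api_auth"])
      else if PySem.Str.isIn "connection" error_str || PySem.Str.isIn "timeout" error_str then
        acc ++ ["connection"]
      else acc ++ ["general"]) = fun acc p => acc ++ [pvCatOf p] := by
      funext acc p; unfold pvCatOf; dsimp only; split_ifs <;> rfl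
    rw [hfA, PySem.List.foldl_append_singleton_eq_map, List.nil_append,
        pvMapContainsAny agent_errors "openai_api" _ pvCatOpenai,
        pvMapContainsAny agent_errors "jira_auth" _ pvCatJira,
        pvMapContainsAny agent_errors "connection" _ pvCatConn,
        pvMapContainsAny agent_errors "api_auth" _ pvCatAuth]
    simp only [List.any_map, Function.comp_def]
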